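-- pv_equiv track=rewrite | github.com/viettran295/cryptoTracking | Leet/oneSegment.py | Solve
-- ===== SOURCE A (Python) =====
-- def Solve(s:str)->bool:
--     check = False
--     for i in s:
--         if(i=='1'):
--             if check:
--                 return False
--         else:
--             check = True
--     return True
-- ===== SOURCE B (Python) =====
-- def Solve(s: str) -> bool:
--     # Two-phase: strip the leading run of '1's, then the rest must contain no '1'.
--     return '1' not in s.lstrip('1')
-- ===== Notes on version B (the rewrite author's own statement) =====
-- stated objective: idiomatic
-- what changed: Replaces A's flag-threaded single pass with a locate-prefix-then-scan decomposition: strip the leading run of '1's, then check that no '1' occurs in the remainder.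
import Mathlib
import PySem

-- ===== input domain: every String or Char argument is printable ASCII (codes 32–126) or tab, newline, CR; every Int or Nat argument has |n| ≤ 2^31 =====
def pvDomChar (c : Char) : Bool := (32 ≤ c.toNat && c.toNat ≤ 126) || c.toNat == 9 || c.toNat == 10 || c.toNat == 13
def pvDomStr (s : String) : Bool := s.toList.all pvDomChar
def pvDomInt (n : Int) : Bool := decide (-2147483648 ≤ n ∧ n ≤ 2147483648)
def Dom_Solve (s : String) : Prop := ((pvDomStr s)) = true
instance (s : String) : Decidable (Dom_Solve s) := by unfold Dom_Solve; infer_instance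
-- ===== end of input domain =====

-- B replaces A's flag-threaded single pass by a two-phase decomposition: strip the
-- leading run of '1's, then check no '1' occurs in the remainder (idiomatic).

-- ===== PORT A =====
-- A's for-loop with early return and the mutable flag `check`, as structural recursion.
def SolveLoop : List Char → Bool → Bool
  | [], _ => true
  | c :: rest, check =>
      if c = '1' then
        if check then false else SolveLoop rest check
      else
        SolveLoop rest true

def Solve (s : String) : Bool := SolveLoop s.toList false

-- ===== PORT B =====
-- `s.lstrip('1')` = drop the leading run of '1's; then `'1' not in …`.
def Solve_alt (s : String) : Bool := !((s.toList.dropWhile (· == '1')).contains '1')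

-- ===== PRECONDITION & SPEC =====
def Spec_Solve (s : String) (out : Bool) : Prop := out = Solve_alt s
instance (s : String) (out : Bool) : Decidable (Spec_Solve s out) := by unfold Spec_Solve; infer_instance

-- ===== CLAIM (what is proved, stated in full; the proofs are below) =====
def Claim_equal_Solve : Prop := ∀ (s : String), Dom_Solve s → Spec_Solve s (Solve s)

-- ===== LEMMAS AND PROOFS =====

-- With the flag set, A's loop returns true iff no '1' remains.
theorem solveLoop_true (l : List Char) : SolveLoop l true = !(l.contains '1') := by
  induction l with
  | nil => simp [SolveLoop]
  | cons c t ih =>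
      by_cases h : c = '1'
      · simp [SolveLoop, h]
      · simp [SolveLoop, h, ih, Ne.symm h]

-- With the flag clear, A's loop equals B's two-phase check.
theorem solveLoop_false (l : List Char) :
    SolveLoop l false = !((l.dropWhile (· == '1')).contains '1') := by
  induction l with
  | nil => simp [SolveLoop]
  | cons c t ih =>
      by_cases h : c = '1'
      · simp [SolveLoop, h, List.dropWhile, ih]
      · have hb : (c == '1') = false := by simp [h]
        simp [SolveLoop, h, List.dropWhile, solveLoop_true, hb, Ne.symm h]

-- ===== VERDICT (by name: the statement is the Claim_ definition above) =====
theorem Solve_spec : Claim_equal_Solve := by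
  intro s _
  show Solve s = Solve_alt s
  simpa [Solve, Solve_alt] using solveLoop_false s.toList
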